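-- pv_equiv track=rewrite | github.com/vibeforge1111/domain-chip-memory | src/domain_chip_memory/memory_preferences.py | is_recommendation_request_text
-- ===== SOURCE A (Python) =====
-- def is_recommendation_request_text(text: str) -> bool:
--     lowered = text.lower()
--     return any(
--         phrase in lowered
--         for phrase in (
--             "can you recommend",
--             "can you suggest",
--             "do you have any recommendations",
--             "do you have any suggestions",
--             "any tips",
--             "any advice",
--             "what should i serve",
--         )
--     )
-- ===== SOURCE B (Python) =====
-- _PHRASES = (
--     "can you recommend",
--     "can you suggest",
--     "do you have any recommendations",
--     "do you have any suggestions",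
--     "any tips",
--     "any advice",
--     "what should i serve",
-- )
--
--
-- def is_recommendation_request_text(text: str) -> bool:
--     lowered = text.lower()
--     for i in range(len(lowered)):
--         for phrase in _PHRASES:
--             if lowered.startswith(phrase, i):
--                 return True
--     return False
-- ===== Notes on version B (the rewrite author's own statement) =====
-- stated objective: alternative
-- what changed: Replaced seven independent whole-text substring-membership scans (one per phrase) with a single left-to-right scan over positions of the lowered text that tests whether any phrase begins at the current position and returns early on the first hit.
import Mathlib
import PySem

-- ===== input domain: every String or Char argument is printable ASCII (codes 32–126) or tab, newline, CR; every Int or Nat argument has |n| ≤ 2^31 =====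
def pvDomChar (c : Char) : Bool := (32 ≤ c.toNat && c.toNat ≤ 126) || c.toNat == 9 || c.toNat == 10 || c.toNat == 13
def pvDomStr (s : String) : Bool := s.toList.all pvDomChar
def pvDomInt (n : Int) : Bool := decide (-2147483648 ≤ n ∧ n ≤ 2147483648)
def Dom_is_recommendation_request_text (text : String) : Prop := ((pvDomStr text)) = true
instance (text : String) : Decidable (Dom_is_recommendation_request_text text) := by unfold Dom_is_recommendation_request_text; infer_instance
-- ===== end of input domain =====

-- B replaces A's seven independent substring scans by one left-to-right scan over
-- positions, checking at each position whether any phrase starts there (alternative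
-- decomposition, early exit on the first hit).

-- ===== PORT A =====
def pvPhrasesA : List String :=
  ["can you recommend", "can you suggest", "do you have any recommendations",
   "do you have any suggestions", "any tips", "any advice", "what should i serve"]

def is_recommendation_request_text (text : String) : Bool :=
  let lowered := PySem.Str.lower text
  pvPhrasesA.any (fun phrase => PySem.Str.isIn phrase lowered)

-- ===== PORT B =====
def pvPhrasesB : List (List Char) :=
  ["can you recommend".toList, "can you suggest".toList,
   "do you have any recommendations".toList, "do you have any suggestions".toList,
   "any tips".toList, "any advice".toList, "what should i serve".toList]

-- the loop 'for i in range(len(lowered)): for phrase in …: if lowered.startswith(phrase, i)'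
-- as structural recursion over the suffixes of the lowered text
def pvScanB : List Char → Bool
  | [] => false
  | c :: rest =>
    if pvPhrasesB.any (fun phrase => PySem.Chars.startswith (c :: rest) phrase) then true
    else pvScanB rest

def is_recommendation_request_text_alt (text : String) : Bool :=
  pvScanB (PySem.Chars.lower text.toList)

-- ===== PRECONDITION & SPEC =====
def Spec_is_recommendation_request_text (text : String) (out : Bool) : Prop := out = is_recommendation_request_text_alt text
instance (text : String) (out : Bool) : Decidable (Spec_is_recommendation_request_text text out) := by unfold Spec_is_recommendation_request_text; infer_instance

-- ===== CLAIM (what is proved, stated in full; the proofs are below) =====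
def Claim_equal_is_recommendation_request_text : Prop := ∀ (text : String), Dom_is_recommendation_request_text text → Spec_is_recommendation_request_text text (is_recommendation_request_text text)

-- ===== LEMMAS AND PROOFS =====

lemma pv_scan_iff (cs : List Char) :
    pvScanB cs = true ↔ ∃ p ∈ pvPhrasesB, p <:+: cs := by
  induction cs with
  | nil =>
    simp only [pvScanB]
    constructor
    · intro h; exact absurd h (by decide)
    · rintro ⟨p, hp, hinf⟩
      rw [List.infix_nil] at hinf
      subst hinf
      revert hp; decide
  | cons c rest ih =>
    rw [pvScanB]
    split_ifs with h
    · simp only [true_iff]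
      simp only [List.any_eq_true, PySem.Chars.startswith_iff] at h
      obtain ⟨p, hp, hpre⟩ := h
      exact ⟨p, hp, hpre.isInfix⟩
    · simp only [List.any_eq_true, PySem.Chars.startswith_iff, not_exists, not_and] at h
      rw [ih]
      constructor
      · rintro ⟨p, hp, hinf⟩
        exact ⟨p, hp, hinf.trans (List.suffix_cons c rest).isInfix⟩
      · rintro ⟨p, hp, hinf⟩
        rcases List.infix_cons_iff.mp hinf with hpre | hinf'
        · exact absurd hpre (by simpa using h p hp)
        · exact ⟨p, hp, hinf'⟩

-- ===== VERDICT (by name: the statement is the Claim_ definition above) =====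
theorem is_recommendation_request_text_spec : Claim_equal_is_recommendation_request_text := by
  intro text _
  unfold Spec_is_recommendation_request_text is_recommendation_request_text
    is_recommendation_request_text_alt
  rw [Bool.eq_iff_iff, pv_scan_iff]
  have hB : pvPhrasesB = pvPhrasesA.map String.toList := by decide
  simp only [List.any_eq_true, PySem.Str.isIn_iff_infix, PySem.Str.toList_lower, hB,
    List.mem_map]
  constructor
  · rintro ⟨p, hp, hinf⟩
    exact ⟨_, ⟨p, hp, rfl⟩, hinf⟩
  · rintro ⟨_, ⟨p, hp, rfl⟩, hinf⟩
    exact ⟨p, hp, hinf⟩
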